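-- pv_equiv track=rewrite | github.com/network-automation-projects/ansible_demo | coding-interview-challenges/nre_core_patterns/exercise.py | config_drift
-- ===== SOURCE A (Python) =====
-- def config_drift(
--     desired: dict[str, str],
--     actual: dict[str, str],
-- ) -> tuple[list[str], list[str], list[str]]:
--     """Return (missing, extra, different): keys only in desired, only in actual, in both with different value."""
--     missing: list[str] = []
--     extra: list[str] = []
--     different: list[str] = []
--                                                                     # TODO: missing = sorted(set(desired) - set(actual)); extra = sorted(set(actual) - set(desired))
--                                                                     # TODO: different = sorted(k for k in set(desired) & set(actual) if desired[k] != actual[k])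
--
--     #find the missing one's keeping them sorted (turn them into sets)
--     missing = sorted(set(desired) - set(actual))
--     extra = sorted(set(actual) - set(desired))
--     #if desired is there but with the wrong actual value
--     different = sorted(d for d in set(desired) & set(actual) if desired[d] != actual[d])
--     return (missing, extra, different)
-- ===== SOURCE B (Python) =====
-- def config_drift(
--     desired: dict[str, str],
--     actual: dict[str, str],
-- ) -> tuple[list[str], list[str], list[str]]:
--     """Return (missing, extra, different): keys only in desired, only in actual, in both with different value."""
--     ds = sorted(desired.items(), key=lambda kv: kv[0])
--     sa = sorted(actual.items(), key=lambda kv: kv[0])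
--     missing: list[str] = []
--     extra: list[str] = []
--     different: list[str] = []
--     i = j = 0
--     while i < len(ds) and j < len(sa):
--         dk, dv = ds[i]
--         ak, av = sa[j]
--         if dk < ak:
--             missing.append(dk)
--             i += 1
--         elif ak < dk:
--             extra.append(ak)
--             j += 1
--         else:
--             if dv != av:
--                 different.append(dk)
--             i += 1
--             j += 1
--     while i < len(ds):
--         missing.append(ds[i][0])
--         i += 1
--     while j < len(sa):
--         extra.append(sa[j][0])
--         j += 1
--     return (missing, extra, different)
-- ===== Notes on version B (the rewrite author's own statement) =====
-- stated objective: alternative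
-- what changed: Replaces A's set-algebra (two set differences, one intersection with a lookup filter, three sorts) by a sort-then-merge: both item lists are sorted by key once and a single two-pointer merge emits missing/extra/different already in sorted order, with no set constructions, no membership tests and no final sorts.
import Mathlib
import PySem

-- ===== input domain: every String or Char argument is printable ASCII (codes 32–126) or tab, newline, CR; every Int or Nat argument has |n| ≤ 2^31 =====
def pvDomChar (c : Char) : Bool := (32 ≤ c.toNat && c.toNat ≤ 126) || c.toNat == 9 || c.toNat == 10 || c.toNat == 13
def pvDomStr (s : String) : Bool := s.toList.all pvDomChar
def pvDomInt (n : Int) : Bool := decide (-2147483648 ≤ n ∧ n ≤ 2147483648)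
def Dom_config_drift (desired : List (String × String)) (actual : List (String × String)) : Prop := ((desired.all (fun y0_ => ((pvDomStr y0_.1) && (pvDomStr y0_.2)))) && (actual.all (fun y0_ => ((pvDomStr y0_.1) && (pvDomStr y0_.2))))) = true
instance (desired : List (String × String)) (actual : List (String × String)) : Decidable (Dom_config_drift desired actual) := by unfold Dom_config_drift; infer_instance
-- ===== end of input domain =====

-- ===== PORT A =====
-- B replaces A's set algebra and three sorts by sorting both item lists by key once and a single
-- two-pointer merge emitting the three lists already sorted (objective: alternative; return value only).
def config_drift (desired : List (String × String)) (actual : List (String × String)) : List String × List String × List String :=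
  let dset : PySem.Set String := PySem.Set.ofList (desired.map Prod.fst)
  let aset : PySem.Set String := PySem.Set.ofList (actual.map Prod.fst)
  let missing : List String := PySem.List.sorted (PySem.Set.diff dset aset) (fun x => x) false
  let extra : List String := PySem.List.sorted (PySem.Set.diff aset dset) (fun x => x) false
  let different : List String := PySem.List.sorted
    ((PySem.Set.inter dset aset).filter
      (fun d => (PySem.Dict.mk desired).getD d "" != (PySem.Dict.mk actual).getD d ""))
    (fun x => x) false
  (missing, extra, different)

-- ===== PORT B =====
-- the two-pointer merge loop of Source B: first clause = the 'j exhausted' tail loop, second = the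
-- 'i exhausted' tail loop, third = the main while loop with its three comparisons
def cdMerge : List (String × String) → List (String × String) → List String × List String × List String
  | xs, [] => (xs.map Prod.fst, [], [])
  | [], y :: ys => ([], (y :: ys).map Prod.fst, [])
  | x :: xs, y :: ys =>
    if x.1 < y.1 then
      let r := cdMerge xs (y :: ys); (x.1 :: r.1, r.2.1, r.2.2)
    else if y.1 < x.1 then
      let r := cdMerge (x :: xs) ys; (r.1, y.1 :: r.2.1, r.2.2)
    else
      let r := cdMerge xs ys
      (r.1, r.2.1, if x.2 != y.2 then x.1 :: r.2.2 else r.2.2)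
termination_by xs ys => xs.length + ys.length

def config_drift_alt (desired : List (String × String)) (actual : List (String × String)) : List String × List String × List String :=
  cdMerge (PySem.List.sorted desired (fun kv => kv.1) false)
          (PySem.List.sorted actual (fun kv => kv.1) false)

-- ===== PRECONDITION & SPEC =====
-- The two lists encode Python dicts, which cannot contain duplicate keys; Pre_ restricts to that
-- natural domain (on duplicate-keyed lists neither program corresponds to a Python input).
def Pre_config_drift (desired : List (String × String)) (actual : List (String × String)) : Prop :=
  (desired.map Prod.fst).Nodup ∧ (actual.map Prod.fst).Nodup
instance (desired : List (String × String)) (actual : List (String × String)) : Decidable (Pre_config_drift desired actual) := by unfold Pre_config_drift; infer_instance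
def pvWitness_config_drift : (List (String × String)) × (List (String × String)) :=
  ([("a", "1"), ("b", "2")], [("b", "9"), ("c", "2")])
def Spec_config_drift (desired : List (String × String)) (actual : List (String × String)) (out : List String × List String × List String) : Prop := out = config_drift_alt desired actual
instance (desired : List (String × String)) (actual : List (String × String)) (out : List String × List String × List String) : Decidable (Spec_config_drift desired actual out) := by unfold Spec_config_drift; infer_instance

-- ===== CLAIM (what is proved, stated in full; the proofs are below) =====
def Claim_equal_config_drift : Prop := ∀ (desired : List (String × String)) (actual : List (String × String)), Dom_config_drift desired actual → Pre_config_drift desired actual → Spec_config_drift desired actual (config_drift desired actual)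

-- ===== LEMMAS AND PROOFS =====

-- a sort by key of a list with distinct keys is STRICTLY increasing in the key
theorem pv_sorted_keylt (l : List (String × String)) (h : (l.map Prod.fst).Nodup) :
    (PySem.List.sorted l (fun kv => kv.1) false).Pairwise (fun a b => a.1 < b.1) := by
  have hle : (PySem.List.sorted l (fun kv => kv.1) false).Pairwise (fun a b => a.1 ≤ b.1) :=
    PySem.List.sorted_pairwise l (fun kv => kv.1)
  have hperm : (PySem.List.sorted l (fun kv => kv.1) false).Perm l :=
    PySem.List.sorted_perm l (fun kv => kv.1) false
  have hnd : ((PySem.List.sorted l (fun kv => kv.1) false).map Prod.fst).Nodup :=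
    ((hperm.map Prod.fst).nodup_iff).mpr h
  have hne : (PySem.List.sorted l (fun kv => kv.1) false).Pairwise (fun a b => a.1 ≠ b.1) :=
    List.pairwise_map.mp hnd
  exact (hle.and hne).imp (fun h => lt_of_le_of_ne h.1 h.2)

-- 'k in xs' is invariant under permutation
theorem pv_contains_perm {l₁ l₂ : List String} (hp : l₁.Perm l₂) (a : String) :
    l₁.contains a = l₂.contains a := by
  rw [Bool.eq_iff_iff]
  simp [hp.mem_iff]

-- dict lookup is invariant under permutation of the item list when keys are distinct
theorem pv_getD_perm (xs ys : List (String × String)) (hp : xs.Perm ys)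
    (hnd : (xs.map Prod.fst).Nodup) (k dflt : String) :
    (PySem.Dict.mk xs).getD k dflt = (PySem.Dict.mk ys).getD k dflt := by
  have hnd' : (ys.map Prod.fst).Nodup := ((hp.map Prod.fst).nodup_iff).mp hnd
  by_cases hk : k ∈ xs.map Prod.fst
  · obtain ⟨kv, hmem, hfst⟩ := List.mem_map.mp hk
    have hx : (k, kv.2) ∈ xs := by rw [← hfst]; exact hmem
    have hy : (k, kv.2) ∈ ys := hp.mem_iff.mp hx
    rw [PySem.Dict.getD_of_mem_items (d := PySem.Dict.mk xs) hx (by simpa [PySem.Dict.keys] using hnd),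
        PySem.Dict.getD_of_mem_items (d := PySem.Dict.mk ys) hy (by simpa [PySem.Dict.keys] using hnd')]
  · have hk' : k ∉ ys.map Prod.fst := fun h => hk (((hp.map Prod.fst).mem_iff).mpr h)
    rw [PySem.Dict.getD_of_not_contains, PySem.Dict.getD_of_not_contains]
    · simp only [PySem.Dict.contains, List.any_eq_false]
      intro p hpmem hbeq
      exact hk' (List.mem_map.mpr ⟨p, hpmem, by simpa using hbeq⟩)
    · simp only [PySem.Dict.contains, List.any_eq_false]
      intro p hpmem hbeq
      exact hk (List.mem_map.mpr ⟨p, hpmem, by simpa using hbeq⟩)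

-- the merge on two strictly key-sorted lists computes the three classification filters
theorem pv_merge_eq (xs ys : List (String × String)) :
    xs.Pairwise (fun a b => a.1 < b.1) → ys.Pairwise (fun a b => a.1 < b.1) →
    cdMerge xs ys =
      ((xs.filter (fun kv => !(ys.map Prod.fst).contains kv.1)).map Prod.fst,
       (ys.filter (fun kv => !(xs.map Prod.fst).contains kv.1)).map Prod.fst,
       (xs.filter (fun kv => ((ys.map Prod.fst).contains kv.1)
          && (kv.2 != (PySem.Dict.mk ys).getD kv.1 ""))).map Prod.fst) := by
  fun_induction cdMerge xs ys with
  | case1 xs => intro _ _; simp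
  | case2 y ys => intro _ _; simp
  | case3 x xs y ys hlt r ih =>
    intro hx hy
    obtain ⟨hxh, hxt⟩ := List.pairwise_cons.mp hx
    obtain ⟨hyh, _⟩ := List.pairwise_cons.mp hy
    have hr := ih hxt hy
    have hxnot : ((y :: ys).map Prod.fst).contains x.1 = false := by
      simp only [List.map_cons, List.contains_cons, Bool.or_eq_false_iff, beq_eq_false_iff_ne]
      refine ⟨ne_of_lt hlt, ?_⟩
      simp only [List.contains_eq_mem, decide_eq_false_iff_not, List.mem_map]
      rintro ⟨kv, hkv, hk⟩
      exact absurd (hk ▸ hyh kv hkv) (not_lt.mpr (le_of_lt hlt))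
    simp only [r, hr, Prod.mk.injEq]
    refine ⟨?_, ?_, ?_⟩
    · rw [List.filter_cons_of_pos (by simp only [hxnot, Bool.not_false])]
      simp
    · refine congrArg (List.map Prod.fst) (List.filter_congr fun kv hkv => ?_).symm
      have h2 : (kv.1 == x.1) = false := by
        refine beq_eq_false_iff_ne.mpr ?_
        rcases List.mem_cons.mp hkv with h | h
        · exact h ▸ ne_of_gt hlt
        · exact ne_of_gt (lt_trans hlt (hyh kv h))
      simp only [List.map_cons, List.contains_cons, h2, Bool.false_or]
    · rw [List.filter_cons_of_neg (by simp only [hxnot, Bool.false_and]; decide)]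
  | case4 x xs y ys hge hlt r ih =>
    intro hx hy
    obtain ⟨hxh, _⟩ := List.pairwise_cons.mp hx
    obtain ⟨hyh, hyt⟩ := List.pairwise_cons.mp hy
    obtain ⟨yk, yv⟩ := y
    have hr := ih hx hyt
    have hynot : ((x :: xs).map Prod.fst).contains yk = false := by
      simp only [List.map_cons, List.contains_cons, Bool.or_eq_false_iff, beq_eq_false_iff_ne]
      refine ⟨ne_of_lt hlt, ?_⟩
      simp only [List.contains_eq_mem, decide_eq_false_iff_not, List.mem_map]
      rintro ⟨kv, hkv, hk⟩
      exact absurd (hk ▸ hxh kv hkv) (not_lt.mpr (le_of_lt hlt))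
    have hne : ∀ kv ∈ x :: xs, (kv.1 == yk) = false := by
      intro kv hkv
      refine beq_eq_false_iff_ne.mpr ?_
      rcases List.mem_cons.mp hkv with h | h
      · exact h ▸ ne_of_gt hlt
      · exact ne_of_gt (lt_trans hlt (hxh kv h))
    have hne' : ∀ kv ∈ x :: xs, (yk == kv.1) = false := fun kv hkv =>
      beq_eq_false_iff_ne.mpr (fun h => (beq_eq_false_iff_ne.mp (hne kv hkv)) h.symm)
    simp only [r, hr, Prod.mk.injEq]
    refine ⟨?_, ?_, ?_⟩
    · refine congrArg (List.map Prod.fst) (List.filter_congr fun kv hkv => ?_).symm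
      simp only [List.map_cons, List.contains_cons, hne kv hkv, Bool.false_or]
    · rw [List.filter_cons_of_pos (by simp only [hynot, Bool.not_false])]
      simp
    · refine congrArg (List.map Prod.fst) (List.filter_congr fun kv hkv => ?_).symm
      simp [List.map_cons, hne kv hkv, hne' kv hkv,
        PySem.Dict.getD, PySem.Dict.get?_mk_cons]
  | case5 x xs y ys hge1 hge2 r ih =>
    intro hx hy
    obtain ⟨hxh, hxt⟩ := List.pairwise_cons.mp hx
    obtain ⟨hyh, hyt⟩ := List.pairwise_cons.mp hy
    obtain ⟨yk, yv⟩ := y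
    have heq : x.1 = yk := le_antisymm (not_lt.mp hge2) (not_lt.mp hge1)
    have hbeq : (x.1 == yk) = true := beq_iff_eq.mpr heq
    have hbeq' : (yk == x.1) = true := beq_iff_eq.mpr heq.symm
    have hr := ih hxt hyt
    have hnex : ∀ kv ∈ xs, (kv.1 == yk) = false := fun kv h =>
      beq_eq_false_iff_ne.mpr (heq ▸ ne_of_gt (hxh kv h))
    have hnex' : ∀ kv ∈ xs, (yk == kv.1) = false := fun kv h =>
      beq_eq_false_iff_ne.mpr (fun hc => (beq_eq_false_iff_ne.mp (hnex kv h)) hc.symm)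
    have hney : ∀ kv ∈ ys, (kv.1 == x.1) = false := by
      intro kv h
      refine beq_eq_false_iff_ne.mpr fun hc => ?_
      have := hyh kv h
      rw [hc, heq] at this
      exact lt_irrefl _ this
    simp only [r, hr, Prod.mk.injEq]
    refine ⟨?_, ?_, ?_⟩
    · rw [List.filter_cons_of_neg (by simp only [List.map_cons, List.contains_cons, hbeq,
        Bool.true_or, Bool.not_true]; decide)]
      refine congrArg (List.map Prod.fst) (List.filter_congr fun kv hkv => ?_).symm
      simp only [List.map_cons, List.contains_cons, hnex kv hkv, Bool.false_or]
    · rw [List.filter_cons_of_neg (by simp only [List.map_cons, List.contains_cons, hbeq',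
        Bool.true_or, Bool.not_true]; decide)]
      refine congrArg (List.map Prod.fst) (List.filter_congr fun kv hkv => ?_).symm
      simp only [List.map_cons, List.contains_cons, hney kv hkv, Bool.false_or]
    · have hp3x : ((((yk, yv) :: ys).map Prod.fst).contains x.1
            && (x.2 != (PySem.Dict.mk ((yk, yv) :: ys)).getD x.1 "")) = (x.2 != yv) := by
        simp [hbeq, hbeq', PySem.Dict.getD, PySem.Dict.get?_mk_cons]
      have htail : List.filter (fun kv => (((yk, yv) :: ys).map Prod.fst).contains kv.1
            && (kv.2 != (PySem.Dict.mk ((yk, yv) :: ys)).getD kv.1 "")) xs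
          = List.filter (fun kv => (ys.map Prod.fst).contains kv.1
            && (kv.2 != (PySem.Dict.mk ys).getD kv.1 "")) xs := by
        refine List.filter_congr fun kv hkv => ?_
        simp [List.map_cons, hnex kv hkv, hnex' kv hkv,
          PySem.Dict.getD, PySem.Dict.get?_mk_cons]
      by_cases hv : (x.2 != yv) = true
      · rw [List.filter_cons_of_pos (by rw [hp3x]; exact hv), if_pos hv, htail]
        simp
      · rw [List.filter_cons_of_neg (by rw [hp3x]; exact hv), if_neg hv, htail]

-- ===== VERDICT (by name: the statement is the Claim_ definition above) =====
theorem config_drift_spec : Claim_equal_config_drift := by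
  intro desired actual _ hpre
  obtain ⟨hd, ha⟩ := hpre
  have hsd : (PySem.List.sorted desired (fun kv => kv.1) false).Perm desired :=
    PySem.List.sorted_perm desired (fun kv => kv.1) false
  have hsa : (PySem.List.sorted actual (fun kv => kv.1) false).Perm actual :=
    PySem.List.sorted_perm actual (fun kv => kv.1) false
  have hpd := pv_sorted_keylt desired hd
  have hpa := pv_sorted_keylt actual ha
  unfold Spec_config_drift config_drift config_drift_alt
  rw [pv_merge_eq _ _ hpd hpa]
  -- rewrite B's predicates so they refer to the unsorted lists
  have hc1 : (PySem.List.sorted desired (fun kv => kv.1) false).filter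
        (fun kv => !((PySem.List.sorted actual (fun kv => kv.1) false).map Prod.fst).contains kv.1)
      = (PySem.List.sorted desired (fun kv => kv.1) false).filter
        (fun kv => !(actual.map Prod.fst).contains kv.1) :=
    List.filter_congr fun kv _ => by rw [pv_contains_perm (hsa.map Prod.fst)]
  have hc2 : (PySem.List.sorted actual (fun kv => kv.1) false).filter
        (fun kv => !((PySem.List.sorted desired (fun kv => kv.1) false).map Prod.fst).contains kv.1)
      = (PySem.List.sorted actual (fun kv => kv.1) false).filter
        (fun kv => !(desired.map Prod.fst).contains kv.1) :=
    List.filter_congr fun kv _ => by rw [pv_contains_perm (hsd.map Prod.fst)]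
  have hc3 : (PySem.List.sorted desired (fun kv => kv.1) false).filter
        (fun kv => ((PySem.List.sorted actual (fun kv => kv.1) false).map Prod.fst).contains kv.1
          && (kv.2 != (PySem.Dict.mk (PySem.List.sorted actual (fun kv => kv.1) false)).getD kv.1 ""))
      = (PySem.List.sorted desired (fun kv => kv.1) false).filter
        (fun kv => (actual.map Prod.fst).contains kv.1
          && (kv.2 != (PySem.Dict.mk actual).getD kv.1 "")) :=
    List.filter_congr fun kv _ => by
      rw [pv_contains_perm (hsa.map Prod.fst),
        pv_getD_perm _ _ hsa (((hsa.map Prod.fst).nodup_iff).mpr ha)]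
  rw [hc1, hc2, hc3]
  simp only [PySem.Set.ofList_eq_self_of_nodup _ hd, PySem.Set.ofList_eq_self_of_nodup _ ha,
    PySem.Set.diff, PySem.Set.inter, PySem.Set.contains_eq_listContains, Prod.mk.injEq]
  refine ⟨?_, ?_, ?_⟩
  · refine PySem.List.sorted_eq_of_perm_of_pairwise_lt _ _ _ ?_ ?_
    · have : (desired.map Prod.fst).filter (fun k => !(actual.map Prod.fst).contains k)
          = (desired.filter (fun kv => !(actual.map Prod.fst).contains kv.1)).map Prod.fst := by
        rw [List.filter_map]; rfl
      rw [this]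
      exact (hsd.filter _).map Prod.fst
    · exact List.pairwise_map.mpr (hpd.filter _)
  · refine PySem.List.sorted_eq_of_perm_of_pairwise_lt _ _ _ ?_ ?_
    · have : (actual.map Prod.fst).filter (fun k => !(desired.map Prod.fst).contains k)
          = (actual.filter (fun kv => !(desired.map Prod.fst).contains kv.1)).map Prod.fst := by
        rw [List.filter_map]; rfl
      rw [this]
      exact (hsa.filter _).map Prod.fst
    · exact List.pairwise_map.mpr (hpa.filter _)
  · refine PySem.List.sorted_eq_of_perm_of_pairwise_lt _ _ _ ?_ ?_
    · have h1 : ((desired.map Prod.fst).filter (fun k => (actual.map Prod.fst).contains k)).filter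
            (fun d => (PySem.Dict.mk desired).getD d "" != (PySem.Dict.mk actual).getD d "")
          = (desired.map Prod.fst).filter (fun k =>
              ((PySem.Dict.mk desired).getD k "" != (PySem.Dict.mk actual).getD k "")
                && (actual.map Prod.fst).contains k) := List.filter_filter
      have h2 : (desired.map Prod.fst).filter (fun k =>
              ((PySem.Dict.mk desired).getD k "" != (PySem.Dict.mk actual).getD k "")
                && (actual.map Prod.fst).contains k)
          = (desired.filter (fun kv =>
              ((PySem.Dict.mk desired).getD kv.1 "" != (PySem.Dict.mk actual).getD kv.1 "")
                && (actual.map Prod.fst).contains kv.1)).map Prod.fst := by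
        rw [List.filter_map]; rfl
      have h3 : desired.filter (fun kv =>
              ((PySem.Dict.mk desired).getD kv.1 "" != (PySem.Dict.mk actual).getD kv.1 "")
                && (actual.map Prod.fst).contains kv.1)
          = desired.filter (fun kv => (actual.map Prod.fst).contains kv.1
              && (kv.2 != (PySem.Dict.mk actual).getD kv.1 "")) := by
        refine List.filter_congr fun kv hkv => ?_
        rw [PySem.Dict.getD_of_mem_items (d := PySem.Dict.mk desired) hkv
              (by simpa [PySem.Dict.keys] using hd),
            Bool.and_comm]
      rw [h1, h2, h3]
      exact (hsd.filter _).map Prod.fst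
    · exact List.pairwise_map.mpr (hpd.filter _)
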